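-- pv_equiv track=rewrite | github.com/saisritejakuppaEros/datapruning | model_training/sana/diffusion/longsana/pipeline/sana_inference_pipeline.py | _create_autoregressive_segments
-- ===== SOURCE A (Python) =====
-- from typing import List, Optional
--
-- def _create_autoregressive_segments(total_frames: int, base_chunk_frames: int) -> List[int]:
--     remained_frames = total_frames % base_chunk_frames
--     num_chunks = total_frames // base_chunk_frames
--     chunk_indices = [0]
--     for i in range(num_chunks):
--         cur_idx = chunk_indices[-1] + base_chunk_frames
--         if i == 0:
--             cur_idx += remained_frames
--         chunk_indices.append(cur_idx)
--     if chunk_indices[-1] < total_frames: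
--         chunk_indices.append(total_frames)
--     return chunk_indices
-- ===== SOURCE B (Python) =====
-- def _create_autoregressive_segments(total_frames: int, base_chunk_frames: int):
--     num_chunks = total_frames // base_chunk_frames
--     rev = []
--     cur = total_frames
--     for _ in range(num_chunks):
--         rev.append(cur)
--         cur -= base_chunk_frames
--     rev.append(0)
--     rev.reverse()
--     if rev[-1] < total_frames:
--         rev.append(total_frames)
--     return rev
-- ===== Notes on version B (the rewrite author's own statement) =====
-- stated objective: alternative
-- what changed: B builds the boundary list back-to-front: it starts from total_frames, repeatedly subtracts base_chunk_frames (never computing the remainder at all), appends 0 and reverses, instead of A's forward accumulation from 0 that adds the remainder into the first chunk.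
-- outside the precondition, e.g. on _create_autoregressive_segments(10, 0): A raises ZeroDivisionError, B raises ZeroDivisionError
import Mathlib
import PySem

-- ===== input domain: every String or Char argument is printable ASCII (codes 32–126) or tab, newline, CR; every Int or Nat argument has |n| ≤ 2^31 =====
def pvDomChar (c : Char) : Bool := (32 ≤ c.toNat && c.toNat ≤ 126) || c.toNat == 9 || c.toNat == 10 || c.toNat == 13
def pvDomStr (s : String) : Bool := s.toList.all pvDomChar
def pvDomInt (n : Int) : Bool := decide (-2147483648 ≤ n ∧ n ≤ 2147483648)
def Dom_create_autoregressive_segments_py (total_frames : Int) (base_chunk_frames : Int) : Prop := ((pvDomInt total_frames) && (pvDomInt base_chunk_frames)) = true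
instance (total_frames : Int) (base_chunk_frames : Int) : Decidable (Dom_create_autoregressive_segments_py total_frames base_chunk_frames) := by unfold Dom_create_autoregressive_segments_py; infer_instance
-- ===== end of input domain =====

-- B builds the list back-to-front from total_frames by repeated subtraction (no remainder
-- computed) and reverses, instead of A's forward accumulation; alternative decomposition.

-- ===== PORT A =====
-- chunk_indices[-1] is always taken on a nonempty list, so getLast?.getD 0 is exact there
def create_autoregressive_segments_py (total_frames : Int) (base_chunk_frames : Int) : List Int :=
  let remained_frames := PySem.Int.mod total_frames base_chunk_frames
  let num_chunks := PySem.Int.floordiv total_frames base_chunk_frames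
  let chunk_indices :=
    (PySem.List.pyRange 0 num_chunks 1).foldl (fun acc i =>
      let cur_idx := acc.getLast?.getD 0 + base_chunk_frames
      let cur_idx := if i == 0 then cur_idx + remained_frames else cur_idx
      acc ++ [cur_idx]) [0]
  if chunk_indices.getLast?.getD 0 < total_frames then chunk_indices ++ [total_frames]
  else chunk_indices

-- ===== PORT B =====
-- rev[-1] is taken on a nonempty list (0 was just appended), so getLast?.getD 0 is exact
def create_autoregressive_segments_py_alt (total_frames : Int) (base_chunk_frames : Int) : List Int :=
  let num_chunks := PySem.Int.floordiv total_frames base_chunk_frames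
  let st := (PySem.List.pyRange 0 num_chunks 1).foldl
    (fun (p : List Int × Int) _ => (p.1 ++ [p.2], p.2 - base_chunk_frames)) ([], total_frames)
  let rev := (st.1 ++ [0]).reverse
  if rev.getLast?.getD 0 < total_frames then rev ++ [total_frames] else rev

-- ===== PRECONDITION & SPEC =====
-- Python A raises ZeroDivisionError exactly when base_chunk_frames = 0
def Pre_create_autoregressive_segments_py (total_frames : Int) (base_chunk_frames : Int) : Prop := base_chunk_frames ≠ 0
instance (total_frames : Int) (base_chunk_frames : Int) : Decidable (Pre_create_autoregressive_segments_py total_frames base_chunk_frames) := by unfold Pre_create_autoregressive_segments_py; infer_instance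
def pvWitness_create_autoregressive_segments_py : Int × Int := (17, 5)

def Spec_create_autoregressive_segments_py (total_frames : Int) (base_chunk_frames : Int) (out : List Int) : Prop := out = create_autoregressive_segments_py_alt total_frames base_chunk_frames
instance (total_frames : Int) (base_chunk_frames : Int) (out : List Int) : Decidable (Spec_create_autoregressive_segments_py total_frames base_chunk_frames out) := by unfold Spec_create_autoregressive_segments_py; infer_instance

-- ===== CLAIM (what is proved, stated in full; the proofs are below) =====
def Claim_equal_create_autoregressive_segments_py : Prop := ∀ (total_frames : Int) (base_chunk_frames : Int), Dom_create_autoregressive_segments_py total_frames base_chunk_frames → Pre_create_autoregressive_segments_py total_frames base_chunk_frames → Spec_create_autoregressive_segments_py total_frames base_chunk_frames (create_autoregressive_segments_py total_frames base_chunk_frames)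

-- ===== LEMMAS AND PROOFS =====

-- A's loop over range(m) starting from [0] produces the closed-form list, m ≥ 1
theorem pv_loop_aux (b rem : Int) : ∀ m : Nat, 1 ≤ m →
    (PySem.List.pyRange 0 (m : Int) 1).foldl (fun acc i =>
      let cur_idx := acc.getLast?.getD 0 + b
      let cur_idx := if i == 0 then cur_idx + rem else cur_idx
      acc ++ [cur_idx]) [0]
    = 0 :: (PySem.List.pyRange 1 ((m : Int) + 1) 1).map (fun k => k * b + rem) := by
  intro m
  induction m with
  | zero => intro h; omega
  | succ k ih =>
    intro _
    rcases Nat.eq_zero_or_pos k with hk | hk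
    · subst hk
      norm_num [PySem.List.pyRange_one, List.range_succ]
    · have hk1 : (1 : Int) ≤ (k : Int) := by exact_mod_cast hk
      have hcast : ((k + 1 : Nat) : Int) = (k : Int) + 1 := by push_cast; ring
      rw [hcast, PySem.List.pyRange_one_succ_right (by omega : (0:Int) ≤ (k : Int)),
        List.foldl_append, ih hk]
      rw [PySem.List.pyRange_one_succ_right (by omega : (1:Int) ≤ (k : Int))]
      rw [PySem.List.pyRange_one_succ_right (by omega : (1:Int) ≤ (k : Int) + 1)]
      rw [PySem.List.pyRange_one_succ_right (by omega : (1:Int) ≤ (k : Int))]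
      simp only [List.foldl_cons, List.foldl_nil, List.map_append, List.map_cons, List.map_nil]
      have hlast : ((0 : Int) :: ((PySem.List.pyRange 1 (k : Int) 1).map (fun x => x * b + rem)
          ++ [(k : Int) * b + rem])).getLast?.getD 0 = (k : Int) * b + rem := by
        rw [show ((0 : Int) :: ((PySem.List.pyRange 1 (k : Int) 1).map (fun x => x * b + rem)
          ++ [(k : Int) * b + rem])) = ((0 : Int) :: (PySem.List.pyRange 1 (k : Int) 1).map
          (fun x => x * b + rem)) ++ [(k : Int) * b + rem] by simp, List.getLast?_concat]
        rfl
      have hne : ((k : Int) == 0) = false := by simp; omega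
      simp only [hlast, hne, if_neg Bool.false_ne_true]
      simp only [List.cons_append, List.append_assoc, List.cons.injEq, true_and,
        List.append_cancel_left_eq, List.cons.injEq, and_true]
      ring

-- A's loop starting from [0] produces exactly the closed-form list (any num_chunks)
theorem pv_loop_eq (b rem : Int) (n : Int) :
    (PySem.List.pyRange 0 n 1).foldl (fun acc i =>
      let cur_idx := acc.getLast?.getD 0 + b
      let cur_idx := if i == 0 then cur_idx + rem else cur_idx
      acc ++ [cur_idx]) [0]
    = 0 :: (PySem.List.pyRange 1 (n + 1) 1).map (fun k => k * b + rem) := by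
  by_cases hn : n ≤ 0
  · rw [PySem.List.pyRange_one_eq_nil hn,
      PySem.List.pyRange_one_eq_nil (by omega : n + 1 ≤ 1)]
    simp
  · have hn' : 0 < n := by omega
    obtain ⟨m, rfl⟩ : ∃ m : Nat, (m : Int) = n := ⟨n.toNat, Int.toNat_of_nonneg (le_of_lt hn')⟩
    exact pv_loop_aux b rem m (by exact_mod_cast hn')

-- B's countdown loop in closed form
theorem pvB_loop (b : Int) : ∀ (m : Nat) (acc : List Int) (c : Int),
    (PySem.List.pyRange 0 (m : Int) 1).foldl
      (fun (p : List Int × Int) _ => (p.1 ++ [p.2], p.2 - b)) (acc, c)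
    = (acc ++ (List.range m).map (fun i : Nat => c - (i : Int) * b), c - (m : Int) * b) := by
  intro m
  induction m with
  | zero => intro acc c; simp [PySem.List.pyRange_one_eq_nil]
  | succ k ih =>
    intro acc c
    have hcast : ((k + 1 : Nat) : Int) = (k : Int) + 1 := by push_cast; ring
    rw [hcast, PySem.List.pyRange_one_succ_right (by positivity : (0:Int) ≤ (k : Int)),
      List.foldl_append, ih]
    simp only [List.foldl_cons, List.foldl_nil, List.range_succ, List.map_append, List.map_cons,
      List.map_nil, List.append_assoc, Prod.mk.injEq]
    exact ⟨trivial, by ring⟩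

-- the reversed countdown list equals A's forward closed form
theorem pvB_rev_eq (t b rem : Int) (m : Nat) (h : t = (m : Int) * b + rem) :
    ((List.range m).map (fun i : Nat => t - (i : Int) * b)).reverse
    = (PySem.List.pyRange 1 ((m : Int) + 1) 1).map (fun k => k * b + rem) := by
  apply List.ext_getElem
  · simp only [List.length_reverse, List.length_map, List.length_range,
      PySem.List.length_pyRange_one]
    omega
  · intro j h1 h2
    have hj : j < m := by simpa using h1
    rw [List.getElem_reverse, List.getElem_map, List.getElem_range, List.getElem_map,
      PySem.List.getElem_pyRange_one]
    simp only [List.length_map, List.length_range]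
    have hc : ((m - 1 - j : Nat) : Int) = (m : Int) - 1 - (j : Int) := by omega
    rw [hc, h]
    ring

theorem create_autoregressive_segments_py_spec : Claim_equal_create_autoregressive_segments_py := by
  intro t b _ _
  unfold Spec_create_autoregressive_segments_py
  unfold create_autoregressive_segments_py create_autoregressive_segments_py_alt
  simp only [pv_loop_eq]
  have hid := PySem.Int.floordiv_mul_add_mod t b
  set q := PySem.Int.floordiv t b with hq
  set rem := PySem.Int.mod t b with hrem
  by_cases hn : q ≤ 0
  · rw [PySem.List.pyRange_one_eq_nil hn, PySem.List.pyRange_one_eq_nil (by omega : q + 1 ≤ 1)]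
    simp
  · obtain ⟨m, hm⟩ : ∃ m : Nat, (m : Int) = q :=
      ⟨q.toNat, Int.toNat_of_nonneg (by omega)⟩
    rw [← hm, pvB_loop b m [] t]
    simp only [List.nil_append, List.reverse_append, List.reverse_cons, List.reverse_nil,
      List.nil_append, List.singleton_append]
    rw [pvB_rev_eq t b rem m (by rw [← hm] at hid; omega)]
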